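-- pv_equiv track=rewrite | github.com/zxr19980213/neo-infer | neo_infer/rule_mining.py | _redundancy_prune_length2_bodies
-- ===== SOURCE A (Python) =====
-- from collections import defaultdict
--
-- def _redundancy_prune_length2_bodies(
--     body_pairs: list[tuple[str, str]],
--     support_map: dict[tuple[str, str], int],
-- ) -> list[tuple[str, str]]:
--     # Keep one representative for same (first relation, support) bucket.
--     buckets: dict[tuple[str, int], list[tuple[str, str]]] = defaultdict(list)
--     for pair in body_pairs:
--         buckets[(pair[0], int(support_map.get(pair, 0)))].append(pair)
--     kept: list[tuple[str, str]] = []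
--     for items in buckets.values():
--         items_sorted = sorted(items, key=lambda x: (x[1], x[0]))
--         kept.append(items_sorted[0])
--     return sorted(kept)
-- ===== SOURCE B (Python) =====
-- def _redundancy_prune_length2_bodies(
--     body_pairs: list[tuple[str, str]],
--     support_map: dict[tuple[str, str], int],
-- ) -> list[tuple[str, str]]:
--     # One pass: keep the single best representative per (first relation, support) bucket.
--     best: dict[tuple[str, int], tuple[str, str]] = {}
--     for pair in body_pairs:
--         key = (pair[0], int(support_map.get(pair, 0)))
--         cur = best.get(key)
--         if cur is None or (pair[1], pair[0]) < (cur[1], cur[0]):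
--             best[key] = pair
--     return sorted(best.values())
-- ===== Notes on version B (the rewrite author's own statement) =====
-- stated objective: simpler
-- what changed: A groups pairs into per-bucket lists and then sorts each bucket to take its head; B fuses grouping and selection into one pass that keeps a single best representative per bucket in a dict, so the second loop over buckets and the per-bucket sorts disappear.
import Mathlib
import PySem

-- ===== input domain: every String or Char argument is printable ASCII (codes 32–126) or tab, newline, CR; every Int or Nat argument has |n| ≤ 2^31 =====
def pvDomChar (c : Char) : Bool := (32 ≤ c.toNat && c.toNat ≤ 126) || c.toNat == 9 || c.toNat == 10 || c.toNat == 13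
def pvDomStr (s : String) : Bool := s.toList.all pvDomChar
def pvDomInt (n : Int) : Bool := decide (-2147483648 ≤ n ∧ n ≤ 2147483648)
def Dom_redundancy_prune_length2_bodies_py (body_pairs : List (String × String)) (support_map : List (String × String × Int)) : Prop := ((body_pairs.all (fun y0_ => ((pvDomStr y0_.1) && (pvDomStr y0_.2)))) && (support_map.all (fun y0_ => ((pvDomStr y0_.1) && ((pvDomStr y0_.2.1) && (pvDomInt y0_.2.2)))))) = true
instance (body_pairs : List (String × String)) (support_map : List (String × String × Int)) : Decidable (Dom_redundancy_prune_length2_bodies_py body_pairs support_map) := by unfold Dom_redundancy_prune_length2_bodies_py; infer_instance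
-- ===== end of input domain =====

-- B replaces A's build-lists-then-sort-each-bucket grouping with a single pass keeping one best
-- representative per bucket in a dict (objective: simpler — the second loop and per-bucket sorts are gone).

-- support_map.get(pair, 0): Python dict lookup (first match under the assoc-list convention); shared by both ports.
def pvSupGet (support_map : List (String × String × Int)) (pair : String × String) : Int :=
  (PySem.Dict.mk (support_map.map (fun e => ((e.1, e.2.1), e.2.2)))).getD pair 0

-- ===== PORT A =====
def redundancy_prune_length2_bodies_py (body_pairs : List (String × String)) (support_map : List (String × String × Int)) : List (String × String) :=
  -- buckets: defaultdict(list); buckets[(pair[0], int(support_map.get(pair, 0)))].append(pair)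
  let buckets : PySem.Dict (String × Int) (List (String × String)) :=
    body_pairs.foldl (fun d pair => d.modify (pair.1, pvSupGet support_map pair) [] (fun l => l ++ [pair])) PySem.Dict.empty
  -- for items in buckets.values(): kept.append(sorted(items, key=lambda x: (x[1], x[0]))[0])
  let kept : List (String × String) :=
    buckets.values.foldl (fun kept items =>
      match PySem.List.sorted2 items (fun x => x.2) (fun x => x.1) with
      | [] => kept          -- unreachable: every bucket list is nonempty (Python's items_sorted[0])
      | m :: _ => kept ++ [m]) []
  PySem.List.sorted2 kept (fun x => x.1) (fun x => x.2)

-- ===== PORT B =====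
def redundancy_prune_length2_bodies_py_alt (body_pairs : List (String × String)) (support_map : List (String × String × Int)) : List (String × String) :=
  -- best: one representative per bucket; 'cur is None or (pair[1], pair[0]) < (cur[1], cur[0])'
  let best : PySem.Dict (String × Int) (String × String) :=
    body_pairs.foldl (fun d pair =>
      let key := (pair.1, pvSupGet support_map pair)
      match d.get? key with
      | none => d.insert key pair
      | some cur =>
        if decide (pair.2 < cur.2) || (pair.2 == cur.2 && decide (pair.1 < cur.1)) then d.insert key pair else d)
      PySem.Dict.empty
  PySem.List.sorted2 best.values (fun x => x.1) (fun x => x.2)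

-- ===== PRECONDITION & SPEC =====
def Spec_redundancy_prune_length2_bodies_py (body_pairs : List (String × String)) (support_map : List (String × String × Int)) (out : List (String × String)) : Prop := out = redundancy_prune_length2_bodies_py_alt body_pairs support_map
instance (body_pairs : List (String × String)) (support_map : List (String × String × Int)) (out : List (String × String)) : Decidable (Spec_redundancy_prune_length2_bodies_py body_pairs support_map out) := by unfold Spec_redundancy_prune_length2_bodies_py; infer_instance

-- ===== CLAIM (what is proved, stated in full; the proofs are below) =====
def Claim_equal_redundancy_prune_length2_bodies_py : Prop := ∀ (body_pairs : List (String × String)) (support_map : List (String × String × Int)), Dom_redundancy_prune_length2_bodies_py body_pairs support_map → Spec_redundancy_prune_length2_bodies_py body_pairs support_map (redundancy_prune_length2_bodies_py body_pairs support_map)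

-- ===== LEMMAS AND PROOFS =====

-- The comparison used by sorted2/min-folds, specialised to pairs with key (x.2, x.1).
def pvLt (a b : String × String) : Bool :=
  decide (a.2 < b.2) || !decide (b.2 < a.2) && decide (a.1 < b.1)

-- Python's tuple compare '(p.2, p.1) < (c.2, c.1)' as written in port B equals pvLt.
theorem pvLtB_eq (p c : String × String) :
    (decide (p.2 < c.2) || (p.2 == c.2 && decide (p.1 < c.1))) = pvLt p c := by
  unfold pvLt
  rcases lt_trichotomy p.2 c.2 with h | h | h
  · simp [h]
  · simp [h]
  · simp [h, not_lt_of_gt h, ne_of_gt h, beq_iff_eq]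

-- running first-minimum step
def pvMin (o : Option (String × String)) (x : String × String) : Option (String × String) :=
  match o with
  | none => some x
  | some m => if pvLt x m then some x else some m

theorem head?_insertBy (lt : (String × String) → (String × String) → Bool) (x : String × String) (ys : List (String × String)) :
    (PySem.List.insertBy lt x ys).head? =
      some (match ys with | [] => x | y :: _ => if lt x y then x else y) := by
  cases ys with
  | nil => simp [PySem.List.insertBy]
  | cons y t => by_cases h : lt x y = true <;> simp [PySem.List.insertBy, h]

-- head of an insertBy-fold is the running first-minimum
theorem head?_foldl_insertBy (l : List (String × String)) :
    ∀ acc : List (String × String),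
    (l.foldl (fun a x => PySem.List.insertBy pvLt x a) acc).head? = l.foldl pvMin acc.head? := by
  induction l with
  | nil => intro acc; rfl
  | cons x t ih =>
    intro acc
    rw [List.foldl_cons, List.foldl_cons, ih, head?_insertBy]
    congr 1
    cases acc with
    | nil => simp [pvMin]
    | cons a r => by_cases hxy : pvLt x a = true <;> simp [pvMin, hxy]

-- head of sorted(items, key=lambda x: (x[1], x[0])) = first minimum under pvLt
theorem head?_sorted2 (l : List (String × String)) :
    (PySem.List.sorted2 l (fun x => x.2) (fun x => x.1)).head? = l.foldl pvMin none := by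
  exact head?_foldl_insertBy l []

-- ---- B's dict fold, characterised pointwise ----

def pvKey (support_map : List (String × String × Int)) (p : String × String) : String × Int :=
  (p.1, pvSupGet support_map p)

def pvStepB (support_map : List (String × String × Int)) (d : PySem.Dict (String × Int) (String × String)) (pair : String × String) : PySem.Dict (String × Int) (String × String) :=
  match d.get? (pvKey support_map pair) with
  | none => d.insert (pvKey support_map pair) pair
  | some cur => if pvLt pair cur then d.insert (pvKey support_map pair) pair else d

theorem foldB_get? (sm : List (String × String × Int)) (l : List (String × String)) :
    ∀ (d : PySem.Dict (String × Int) (String × String)) (c : String × Int),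
    ((l.foldl (pvStepB sm) d).get? c) = (l.filter (fun p => pvKey sm p == c)).foldl pvMin (d.get? c) := by
  induction l with
  | nil => intro d c; rfl
  | cons p t ih =>
    intro d c
    rw [List.foldl_cons, ih]
    have hstep : (pvStepB sm d p).get? c =
        if (pvKey sm p == c) = true then pvMin (d.get? c) p else d.get? c := by
      unfold pvStepB
      by_cases hk : pvKey sm p = c
      · subst hk
        cases h : d.get? (pvKey sm p) with
        | none => simp [PySem.Dict.get?_insert_self, pvMin]
        | some cur =>
          by_cases hlt : pvLt p cur = true <;>
            simp [h, hlt, PySem.Dict.get?_insert_self, pvMin]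
      · have hne : c ≠ pvKey sm p := fun h => hk h.symm
        cases h : d.get? (pvKey sm p) with
        | none => simp [PySem.Dict.get?_insert_of_ne _ _ hne, beq_iff_eq, hk]
        | some cur =>
          by_cases hlt : pvLt p cur = true <;>
            simp [hlt, PySem.Dict.get?_insert_of_ne _ _ hne, beq_iff_eq, hk]
    by_cases hk : (pvKey sm p == c) = true <;>
      simp [hk, hstep]

theorem foldB_keys (sm : List (String × String × Int)) (l : List (String × String)) :
    ∀ d : PySem.Dict (String × Int) (String × String),
    (l.foldl (pvStepB sm) d).keys = PySem.Set.update d.keys (l.map (pvKey sm)) := by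
  induction l with
  | nil => intro d; rfl
  | cons p t ih =>
    intro d
    rw [List.foldl_cons, ih]
    have hstep : (pvStepB sm d p).keys = PySem.Set.add d.keys (pvKey sm p) := by
      unfold pvStepB
      cases h : d.get? (pvKey sm p) with
      | none =>
        have hmem : pvKey sm p ∉ d.keys := (PySem.Dict.get?_eq_none_iff_not_mem_keys d _).mp h
        have hcont : d.contains (pvKey sm p) = false := by
          by_contra hc
          exact hmem ((PySem.Dict.contains_iff_mem_keys d _).mp (by simpa using hc))
        rw [PySem.Dict.keys_insert_of_not_contains d _ hcont]
        simp [PySem.Set.add, List.contains_eq_mem, hmem]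
      | some cur =>
        have hmem : pvKey sm p ∈ d.keys := by
          by_contra hmem
          simp [(PySem.Dict.get?_eq_none_iff_not_mem_keys d _).mpr hmem] at h
        have hcont : d.contains (pvKey sm p) = true := (PySem.Dict.contains_iff_mem_keys d _).mpr hmem
        have hadd : PySem.Set.add d.keys (pvKey sm p) = d.keys := by
          simp [PySem.Set.add, List.contains_eq_mem, hmem]
        by_cases hlt : pvLt p cur = true <;>
          simp [hlt, PySem.Dict.keys_insert_of_contains d _ hcont, hadd]
    rw [hstep]
    simp only [List.map_cons, PySem.Set.update, List.foldl_cons]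

-- A's per-bucket "sort then take the head" loop, as a map of running minima
theorem kept_eq (vals : List (List (String × String))) (h : ∀ l ∈ vals, l ≠ []) :
    vals.foldl (fun kept items =>
      match PySem.List.sorted2 items (fun x => x.2) (fun x => x.1) with
      | [] => kept
      | m :: _ => kept ++ [m]) []
    = vals.map (fun l => (l.foldl pvMin none).getD ("", "")) := by
  rw [PySem.List.foldl_congr_mem vals _
      (fun kept items => kept ++ [(items.foldl pvMin none).getD ("", "")]) []
      (by
        intro acc items hmem
        have hne := h items hmem
        cases hs : PySem.List.sorted2 items (fun x => x.2) (fun x => x.1) with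
        | nil =>
          have hp := PySem.List.sorted2_perm items (fun x => x.2) (fun x => x.1) false
          rw [hs] at hp
          exact absurd hp.symm.eq_nil hne
        | cons m t =>
          have : some m = items.foldl pvMin none := by
            rw [← head?_sorted2 items, hs]; rfl
          simp [← this])]
  exact PySem.List.foldl_append_singleton_eq_map _ vals []

-- common normal form: bucket keys in first-occurrence order, each mapped to its bucket's first minimum
def pvK (bp : List (String × String)) (sm : List (String × String × Int)) : List (String × Int) :=
  PySem.Set.update [] (bp.map (pvKey sm))

def pvR (bp : List (String × String)) (sm : List (String × String × Int)) (c : String × Int) : String × String :=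
  ((bp.filter (fun p => pvKey sm p == c)).foldl pvMin none).getD ("", "")

theorem pvK_nonempty_bucket (bp : List (String × String)) (sm : List (String × String × Int))
    (c : String × Int) (hc : c ∈ pvK bp sm) :
    bp.filter (fun p => pvKey sm p == c) ≠ [] := by
  have hc' : c ∈ bp.map (pvKey sm) := (PySem.Set.mem_ofList (bp.map (pvKey sm)) c).mp hc
  obtain ⟨p, hp, hkp⟩ := List.mem_map.mp hc'
  exact List.ne_nil_of_mem (List.mem_filter.mpr ⟨hp, by simp [hkp]⟩)

theorem B_eq (bp : List (String × String)) (sm : List (String × String × Int)) :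
    redundancy_prune_length2_bodies_py_alt bp sm
      = PySem.List.sorted2 ((pvK bp sm).map (pvR bp sm)) (fun x => x.1) (fun x => x.2) := by
  unfold redundancy_prune_length2_bodies_py_alt
  have hfun : (fun (d : PySem.Dict (String × Int) (String × String)) (pair : String × String) =>
      match d.get? (pair.1, pvSupGet sm pair) with
      | none => d.insert (pair.1, pvSupGet sm pair) pair
      | some cur =>
        if decide (pair.2 < cur.2) || (pair.2 == cur.2 && decide (pair.1 < cur.1)) then
          d.insert (pair.1, pvSupGet sm pair) pair
        else d) = pvStepB sm := by
    funext d pair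
    simp only [pvLtB_eq]
    rfl
  simp only [hfun]
  have hkeys : (bp.foldl (pvStepB sm) PySem.Dict.empty).keys = pvK bp sm := by
    rw [foldB_keys sm bp PySem.Dict.empty, PySem.Dict.keys_empty]; rfl
  have hnodup : (bp.foldl (pvStepB sm) PySem.Dict.empty).keys.Nodup := by
    rw [hkeys]
    exact PySem.Set.nodup_update [] _ List.nodup_nil
  rw [PySem.Dict.values_eq_map_keys _ hnodup ("", ""), hkeys]
  congr 1
  refine List.map_congr_left ?_
  intro c _
  show (bp.foldl (pvStepB sm) PySem.Dict.empty).getD c ("", "") = pvR bp sm c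
  rw [PySem.Dict.getD, foldB_get? sm bp PySem.Dict.empty c]
  rfl

theorem A_eq (bp : List (String × String)) (sm : List (String × String × Int)) :
    redundancy_prune_length2_bodies_py bp sm
      = PySem.List.sorted2 ((pvK bp sm).map (pvR bp sm)) (fun x => x.1) (fun x => x.2) := by
  unfold redundancy_prune_length2_bodies_py
  dsimp only []
  have hkeys : (bp.foldl (fun d pair =>
      d.modify (pair.1, pvSupGet sm pair) [] (fun l => l ++ [pair])) PySem.Dict.empty).keys
      = pvK bp sm := by
    have h := PySem.Dict.keys_foldl_modify_key bp (fun pair : String × String => (pair.1, pvSupGet sm pair))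
      ([] : List (String × String)) (fun _ pair => (fun l => l ++ [pair])) PySem.Dict.empty
    rw [PySem.Dict.keys_empty] at h
    exact h
  have hnodup : (bp.foldl (fun d pair =>
      d.modify (pair.1, pvSupGet sm pair) [] (fun l => l ++ [pair])) PySem.Dict.empty).keys.Nodup := by
    rw [hkeys]
    exact PySem.Set.nodup_update [] _ List.nodup_nil
  have hget : ∀ c, (bp.foldl (fun d pair =>
      d.modify (pair.1, pvSupGet sm pair) [] (fun l => l ++ [pair])) PySem.Dict.empty).getD c []
      = bp.filter (fun p => pvKey sm p == c) := by
    intro c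
    have h := PySem.Dict.getD_foldl_modify_append (bp.map (fun p => (pvKey sm p, p))) PySem.Dict.empty c
    rw [List.foldl_map] at h
    simpa [List.filter_map, List.map_map, Function.comp_def, pvKey] using h
  rw [PySem.Dict.values_eq_map_keys _ hnodup [], hkeys]
  have hne : ∀ l ∈ (pvK bp sm).map (fun k => (bp.foldl (fun d pair =>
      d.modify (pair.1, pvSupGet sm pair) [] (fun l => l ++ [pair])) PySem.Dict.empty).getD k []), l ≠ [] := by
    intro l hl
    obtain ⟨c, hc, rfl⟩ := List.mem_map.mp hl
    rw [hget c]
    exact pvK_nonempty_bucket bp sm c hc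
  rw [kept_eq _ hne, List.map_map]
  congr 1
  refine List.map_congr_left ?_
  intro c hc
  simp only [Function.comp, hget c]
  rfl

-- ===== VERDICT (by name: the statement is the Claim_ definition above) =====
theorem redundancy_prune_length2_bodies_py_spec : Claim_equal_redundancy_prune_length2_bodies_py := by
  intro bp sm _
  unfold Spec_redundancy_prune_length2_bodies_py
  rw [A_eq, B_eq]
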